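-- pv_equiv track=rewrite | github.com/DevourAI/trimit-human-in-loop | trimit/backend/utils.py | find_leftover_transcript_offsets
-- ===== SOURCE A (Python) =====
-- def find_leftover_transcript_offsets(segment_words_without_keep, leftover_transcript):
--     for segment_end_break in range(len(segment_words_without_keep)):
--         start_seg_len = len(segment_words_without_keep) - segment_end_break
--         start_segment = segment_words_without_keep[:start_seg_len]
--         start_offset = 0
--         found = False
--         offsets = []
--         end_offset = start_seg_len
--         for start_offset in range(len(leftover_transcript)):
--             end_offset = start_offset + start_seg_len
--             found = start_segment == leftover_transcript[start_offset:end_offset]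
--             if found:
--                 break
--         if found:
--             offsets.append((start_offset, end_offset))
--             leftover_offset = start_offset + len(start_segment)
--             leftover_transcript = leftover_transcript[leftover_offset:]
--
--             end_segment = segment_words_without_keep[start_seg_len:]
--             if not end_segment:
--                 return offsets
--             end_offsets = find_leftover_transcript_offsets(
--                 end_segment, leftover_transcript
--             )
--             end_offsets = [
--                 (s + leftover_offset, e + leftover_offset) for s, e in end_offsets
--             ]
--             offsets.extend(end_offsets)
--             return offsets
--     return []
-- ===== SOURCE B (Python) =====
-- def find_leftover_transcript_offsets(segment_words_without_keep, leftover_transcript):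
--     # One pass per level: compute the longest-common-prefix length of the remaining
--     # segment against every transcript suffix, keeping the first strict maximum.
--     # That maximum IS the longest matchable prefix, and the first position reaching
--     # it is the earliest occurrence; iterate with a running base offset instead of
--     # recursing and re-shifting results.
--     def lcp(a, b):
--         n = 0
--         while n < len(a) and n < len(b) and a[n] == b[n]:
--             n += 1
--         return n
--
--     out = []
--     base = 0
--     seg = segment_words_without_keep
--     txt = leftover_transcript
--     while seg:
--         best = 0
--         pos = 0
--         for t in range(len(txt)):
--             l = lcp(seg, txt[t:])
--             if l > best:
--                 best, pos = l, t
--         if best == 0: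
--             return out
--         out.append((base + pos, base + pos + best))
--         base += pos + best
--         txt = txt[pos + best:]
--         seg = seg[best:]
--     return out
-- ===== Notes on version B (the rewrite author's own statement) =====
-- stated objective: faster
-- what changed: A's per-level double scan (every prefix length, descending, each rechecked at every transcript offset by slice comparison) and its recursion are replaced by a single pass per level that computes the lcp of the remaining segment with each transcript suffix, keeping the first strict maximum (the longest matchable prefix and its earliest occurrence), iterated with a running base offset.
import Mathlib
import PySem

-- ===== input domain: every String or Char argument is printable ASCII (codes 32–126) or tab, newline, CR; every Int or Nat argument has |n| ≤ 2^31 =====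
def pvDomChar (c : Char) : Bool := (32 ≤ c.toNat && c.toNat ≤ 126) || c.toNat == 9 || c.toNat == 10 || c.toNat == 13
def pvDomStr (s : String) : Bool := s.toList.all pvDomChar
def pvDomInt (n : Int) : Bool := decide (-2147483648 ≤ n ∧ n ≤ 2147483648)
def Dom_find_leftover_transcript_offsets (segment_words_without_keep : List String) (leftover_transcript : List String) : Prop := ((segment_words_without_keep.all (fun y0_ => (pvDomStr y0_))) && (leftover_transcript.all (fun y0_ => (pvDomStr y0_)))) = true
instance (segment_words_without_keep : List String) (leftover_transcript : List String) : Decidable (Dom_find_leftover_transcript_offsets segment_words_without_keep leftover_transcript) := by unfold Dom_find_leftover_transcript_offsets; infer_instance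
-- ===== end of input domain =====

-- B replaces A's double scan over prefix lengths × offsets (and its recursion) by one
-- lcp pass per level with a running base offset; objective: faster (asymptotic per level).

-- ===== PORT A =====
-- inner loop: `for start_offset in range(len(leftover_transcript)): found = start_segment == leftover_transcript[start_offset:end_offset]; if found: break`
-- returns the first matching start_offset (the loop breaks there), none if the loop ends unfound
def pvInnerA (startSeg txt : List String) (L s : Nat) : Option Nat :=
  if _h : s < txt.length then
    if startSeg = PySem.List.slice txt (some (s : Int)) (some ((s : Int) + (L : Int))) then
      some s
    else pvInnerA startSeg txt L (s + 1)
  else none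
termination_by txt.length - s

-- outer loop `for segment_end_break in range(len(segment_words_without_keep))` as recursion on brk;
-- the recursive Python call on end_segment is the `brk := 0` call on the shorter list
def pvOuterA (seg txt : List String) (brk : Nat) : List (Int × Int) :=
  if _h : brk < seg.length then
    let L := seg.length - brk                                   -- start_seg_len
    let startSeg := PySem.List.slice seg none (some (L : Int))  -- segment_words_without_keep[:start_seg_len]
    match pvInnerA startSeg txt L 0 with
    | some s =>
      let offsets : List (Int × Int) := [((s : Int), (s : Int) + (L : Int))]
      let leftoverOff := s + startSeg.length                    -- start_offset + len(start_segment)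
      let txt' := PySem.List.slice txt (some (leftoverOff : Int)) none   -- leftover_transcript[leftover_offset:]
      let endSeg := PySem.List.slice seg (some (L : Int)) none           -- segment_words_without_keep[start_seg_len:]
      if endSeg = [] then offsets
      else offsets ++ (pvOuterA endSeg txt' 0).map
        (fun p => (p.1 + (leftoverOff : Int), p.2 + (leftoverOff : Int)))
    | none => pvOuterA seg txt (brk + 1)
  else []
termination_by (seg.length, seg.length - brk)
decreasing_by
  · refine Prod.Lex.left _ _ ?_
    simp only [PySem.List.slice_from_natCast, List.length_drop]
    omega
  · exact Prod.Lex.right _ (by omega)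

def find_leftover_transcript_offsets (segment_words_without_keep : List String) (leftover_transcript : List String) : List (Int × Int) :=
  pvOuterA segment_words_without_keep leftover_transcript 0

-- ===== PORT B =====
-- Source B's index-based while loop `lcp`, as the same front-to-back comparison structurally
def pvLcp : List String → List String → Nat
  | a :: as, b :: bs => if a = b then pvLcp as bs + 1 else 0
  | _, _ => 0

-- Source B's `for t in range(len(txt))` pass tracking (best, pos), first strict maximum
def pvScan (seg txt : List String) : Nat × Nat :=
  (List.range txt.length).foldl
    (fun bp t =>
      let l := pvLcp seg (txt.drop t)   -- lcp(seg, txt[t:])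
      if bp.1 < l then (l, t) else bp)
    (0, 0)

-- Source B's `while seg:` loop with accumulator out and running base
def pvGoB (seg txt : List String) (base : Int) (out : List (Int × Int)) : List (Int × Int) :=
  if _hs : seg = [] then out
  else
    let bp := pvScan seg txt
    if _hb : bp.1 = 0 then out
    else
      pvGoB (seg.drop bp.1) (txt.drop (bp.2 + bp.1)) (base + (bp.2 : Int) + (bp.1 : Int))
        (out ++ [(base + (bp.2 : Int), base + (bp.2 : Int) + (bp.1 : Int))])
termination_by seg.length
decreasing_by
  have h1 : seg.length ≠ 0 := by simpa [List.length_eq_zero_iff] using _hs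
  have hb' : (pvScan seg txt).1 ≠ 0 := _hb
  simp only [List.length_drop]; omega

def find_leftover_transcript_offsets_alt (segment_words_without_keep : List String) (leftover_transcript : List String) : List (Int × Int) :=
  pvGoB segment_words_without_keep leftover_transcript 0 []

-- ===== PRECONDITION & SPEC =====
def Spec_find_leftover_transcript_offsets (segment_words_without_keep : List String) (leftover_transcript : List String) (out : List (Int × Int)) : Prop := out = find_leftover_transcript_offsets_alt segment_words_without_keep leftover_transcript
instance (segment_words_without_keep : List String) (leftover_transcript : List String) (out : List (Int × Int)) : Decidable (Spec_find_leftover_transcript_offsets segment_words_without_keep leftover_transcript out) := by unfold Spec_find_leftover_transcript_offsets; infer_instance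

-- ===== CLAIM (what is proved, stated in full; the proofs are below) =====
def Claim_equal_find_leftover_transcript_offsets : Prop := ∀ (segment_words_without_keep : List String) (leftover_transcript : List String), Dom_find_leftover_transcript_offsets segment_words_without_keep leftover_transcript → Spec_find_leftover_transcript_offsets segment_words_without_keep leftover_transcript (find_leftover_transcript_offsets segment_words_without_keep leftover_transcript)

-- ===== LEMMAS AND PROOFS =====

theorem pvLcp_le_left (a b : List String) : pvLcp a b ≤ a.length := by
  induction a generalizing b with
  | nil => simp [pvLcp]
  | cons x as ih =>
    cases b with
    | nil => simp [pvLcp]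
    | cons y bs =>
      simp only [pvLcp, List.length_cons]
      split
      · exact Nat.succ_le_succ (ih bs)
      · omega

-- seg[:L] matches the transcript at s  ↔  the lcp at s is at least L
theorem take_eq_iff_le_lcp (a b : List String) (L : Nat) (hL : L ≤ a.length) :
    a.take L = b.take L ↔ L ≤ pvLcp a b := by
  induction a generalizing b L with
  | nil =>
    have : L = 0 := by simpa using hL
    subst this; simp
  | cons x as ih =>
    cases L with
    | zero => simp
    | succ L =>
      cases b with
      | nil =>
        simp only [List.take_nil, pvLcp]
        constructor
        · intro h; exact absurd h (by simp)
        · omega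
      | cons y bs =>
        simp only [List.take_succ_cons, List.cons.injEq, pvLcp]
        by_cases hxy : x = y
        · subst hxy
          rw [if_pos rfl]
          simp only [true_and]
          rw [ih bs L (by simpa using hL)]
          omega
        · simp [hxy]

-- the scan fold over a partial range (proof helper)
def pvScanN (seg txt : List String) (n : Nat) : Nat × Nat :=
  (List.range n).foldl
    (fun bp t => let l := pvLcp seg (txt.drop t); if bp.1 < l then (l, t) else bp) (0, 0)

theorem pvScanN_succ (seg txt : List String) (n : Nat) :
    pvScanN seg txt (n + 1) =
      if (pvScanN seg txt n).1 < pvLcp seg (txt.drop n) then (pvLcp seg (txt.drop n), n)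
      else pvScanN seg txt n := by
  simp [pvScanN, List.range_succ]

theorem pvScanN_spec (seg txt : List String) (n : Nat) :
    (∀ t < n, pvLcp seg (txt.drop t) ≤ (pvScanN seg txt n).1) ∧
    ((pvScanN seg txt n).1 ≠ 0 →
      (pvScanN seg txt n).2 < n ∧
      pvLcp seg (txt.drop (pvScanN seg txt n).2) = (pvScanN seg txt n).1 ∧
      ∀ t < (pvScanN seg txt n).2, pvLcp seg (txt.drop t) < (pvScanN seg txt n).1) := by
  induction n with
  | zero => exact ⟨by omega, by simp [pvScanN]⟩
  | succ n ih =>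
    obtain ⟨ih1, ih2⟩ := ih
    rw [pvScanN_succ]
    by_cases hlt : (pvScanN seg txt n).1 < pvLcp seg (txt.drop n)
    · rw [if_pos hlt]
      refine ⟨?_, ?_⟩
      · intro t ht
        rcases Nat.lt_succ_iff_lt_or_eq.mp ht with h | h
        · exact le_of_lt (lt_of_le_of_lt (ih1 t h) hlt)
        · subst h; exact le_rfl
      · intro _
        exact ⟨Nat.lt_succ_self n, rfl, fun t ht => lt_of_le_of_lt (ih1 t ht) hlt⟩
    · rw [if_neg hlt]
      refine ⟨?_, ?_⟩
      · intro t ht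
        rcases Nat.lt_succ_iff_lt_or_eq.mp ht with h | h
        · exact ih1 t h
        · subst h; omega
      · intro h0
        obtain ⟨h1, h2, h3⟩ := ih2 h0
        exact ⟨Nat.lt_succ_of_lt h1, h2, h3⟩

theorem pvScan_eq_scanN (seg txt : List String) : pvScan seg txt = pvScanN seg txt txt.length := rfl

-- first-strict-max invariant of Source B's scan
theorem pvScan_spec (seg txt : List String) :
    (∀ t < txt.length, pvLcp seg (txt.drop t) ≤ (pvScan seg txt).1) ∧
    ((pvScan seg txt).1 ≠ 0 →
      (pvScan seg txt).2 < txt.length ∧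
      pvLcp seg (txt.drop (pvScan seg txt).2) = (pvScan seg txt).1 ∧
      ∀ t < (pvScan seg txt).2, pvLcp seg (txt.drop t) < (pvScan seg txt).1) := by
  rw [pvScan_eq_scanN]
  exact pvScanN_spec seg txt txt.length

theorem pvInnerA_none (p txt : List String) (L : Nat) :
    ∀ s0, (∀ s, s0 ≤ s → s < txt.length → p ≠ (txt.drop s).take L) →
    pvInnerA p txt L s0 = none := by
  suffices H : ∀ k s0, txt.length - s0 ≤ k →
      (∀ s, s0 ≤ s → s < txt.length → p ≠ (txt.drop s).take L) →
      pvInnerA p txt L s0 = none by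
    intro s0 h; exact H (txt.length - s0) s0 le_rfl h
  intro k
  induction k with
  | zero =>
    intro s0 hk _
    rw [pvInnerA, dif_neg (by omega)]
  | succ k ih =>
    intro s0 hk h
    rw [pvInnerA]
    by_cases hlt : s0 < txt.length
    · rw [dif_pos hlt, PySem.List.slice_natCast_add, if_neg (h s0 le_rfl hlt)]
      exact ih (s0 + 1) (by omega) (fun s hs => h s (by omega))
    · rw [dif_neg hlt]

theorem pvInnerA_some (p txt : List String) (L s : Nat)
    (hs : s < txt.length) (hm : p = (txt.drop s).take L) :
    ∀ s0, s0 ≤ s → (∀ t, s0 ≤ t → t < s → p ≠ (txt.drop t).take L) →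
    pvInnerA p txt L s0 = some s := by
  suffices H : ∀ k s0, s - s0 ≤ k → s0 ≤ s →
      (∀ t, s0 ≤ t → t < s → p ≠ (txt.drop t).take L) →
      pvInnerA p txt L s0 = some s by
    intro s0 hs0 hmin; exact H (s - s0) s0 le_rfl hs0 hmin
  intro k
  induction k with
  | zero =>
    intro s0 hk hs0 _
    have : s0 = s := by omega
    subst this
    rw [pvInnerA, dif_pos hs, PySem.List.slice_natCast_add, if_pos hm]
  | succ k ih =>
    intro s0 hk hs0 hmin
    by_cases heq : s0 = s
    · subst heq
      rw [pvInnerA, dif_pos hs, PySem.List.slice_natCast_add, if_pos hm]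
    · have hlt : s0 < s := by omega
      rw [pvInnerA, dif_pos (by omega), PySem.List.slice_natCast_add,
        if_neg (hmin s0 le_rfl hlt)]
      exact ih (s0 + 1) (by omega) (by omega) (fun t ht => hmin t (by omega))

-- A's level result in terms of B's scan
theorem pvOuterA_level (seg txt : List String) (k brk : Nat)
    (hk : seg.length - brk ≤ k) (hM : (pvScan seg txt).1 ≤ seg.length - brk) :
    pvOuterA seg txt brk =
      if (pvScan seg txt).1 = 0 then []
      else
        (((pvScan seg txt).2 : Int), ((pvScan seg txt).2 : Int) + ((pvScan seg txt).1 : Int)) ::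
          (pvOuterA (seg.drop (pvScan seg txt).1) (txt.drop ((pvScan seg txt).2 + (pvScan seg txt).1)) 0).map
            (fun p => (p.1 + (((pvScan seg txt).2 + (pvScan seg txt).1 : Nat) : Int),
                       p.2 + (((pvScan seg txt).2 + (pvScan seg txt).1 : Nat) : Int))) := by
  induction k generalizing brk with
  | zero =>
    rw [if_pos (by omega)]
    rw [pvOuterA, dif_neg (by omega)]
  | succ k ih =>
    by_cases hbrk : brk < seg.length
    · obtain ⟨hmax, hwit⟩ := pvScan_spec seg txt
      by_cases hML : (pvScan seg txt).1 = seg.length - brk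
      · -- the longest matchable prefix has exactly length L = seg.length - brk
        have hM0 : (pvScan seg txt).1 ≠ 0 := by omega
        obtain ⟨hsLt, hfs, hmin⟩ := hwit hM0
        have hLle : seg.length - brk ≤ seg.length := by omega
        have hInner : pvInnerA (seg.take (seg.length - brk)) txt (seg.length - brk) 0 = some (pvScan seg txt).2 := by
          refine pvInnerA_some _ _ _ _ hsLt ?_ 0 (Nat.zero_le _) ?_
          · exact (take_eq_iff_le_lcp seg (txt.drop (pvScan seg txt).2) _ hLle).mpr (by omega)
          · intro t _ ht hc
            have := (take_eq_iff_le_lcp seg (txt.drop t) _ hLle).mp hc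
            have := hmin t ht
            omega
        rw [pvOuterA, dif_pos hbrk]
        simp only [PySem.List.slice_to_natCast, PySem.List.slice_from_natCast, hInner,
          List.length_take]
        rw [if_neg hM0, ← hML]
        have hlen : min (pvScan seg txt).1 seg.length = (pvScan seg txt).1 := by omega
        rw [hlen]
        by_cases hEnd : seg.drop (pvScan seg txt).1 = []
        · rw [if_pos hEnd, hEnd]
          rw [pvOuterA, dif_neg (by simp)]
          simp
        · rw [if_neg hEnd]
          simp
      · -- no prefix of length L occurs: the inner loop finds nothing, continue with brk+1
        have hInner : pvInnerA (seg.take (seg.length - brk)) txt (seg.length - brk) 0 = none := by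
          apply pvInnerA_none
          intro t _ ht hc
          have := (take_eq_iff_le_lcp seg (txt.drop t) _ (by omega)).mp hc
          have := hmax t ht
          omega
        rw [pvOuterA, dif_pos hbrk]
        simp only [PySem.List.slice_to_natCast, hInner]
        exact ih (brk + 1) (by omega) (by omega)
    · rw [if_pos (by omega)]
      rw [pvOuterA, dif_neg hbrk]

theorem pvGoB_eq (n : Nat) : ∀ (seg txt : List String) (base : Int) (out : List (Int × Int)),
    seg.length ≤ n →
    pvGoB seg txt base out =
      out ++ (pvOuterA seg txt 0).map (fun p => (p.1 + base, p.2 + base)) := by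
  induction n with
  | zero =>
    intro seg txt base out hn
    have hseg : seg = [] := by
      cases seg with
      | nil => rfl
      | cons x xs => simp at hn
    subst hseg
    rw [pvGoB, dif_pos rfl, pvOuterA, dif_neg (by simp)]
    simp
  | succ n ih =>
    intro seg txt base out hn
    by_cases hseg : seg = []
    · subst hseg
      rw [pvGoB, dif_pos rfl, pvOuterA, dif_neg (by simp)]
      simp
    · rw [pvGoB, dif_neg hseg]
      have hMle : (pvScan seg txt).1 ≤ seg.length := by
        obtain ⟨_, hwit⟩ := pvScan_spec seg txt
        by_cases h0 : (pvScan seg txt).1 = 0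
        · omega
        · obtain ⟨_, hfs, _⟩ := hwit h0
          calc (pvScan seg txt).1 = _ := hfs.symm
            _ ≤ seg.length := pvLcp_le_left _ _
      rw [pvOuterA_level seg txt seg.length 0 (by omega) (by omega)]
      by_cases hb : (pvScan seg txt).1 = 0
      · rw [dif_pos hb, if_pos hb]
        simp
      · rw [dif_neg hb, if_neg hb]
        have hrec := ih (seg.drop (pvScan seg txt).1) (txt.drop ((pvScan seg txt).2 + (pvScan seg txt).1))
          (base + ((pvScan seg txt).2 : Int) + ((pvScan seg txt).1 : Int))
          (out ++ [(base + ((pvScan seg txt).2 : Int), base + ((pvScan seg txt).2 : Int) + ((pvScan seg txt).1 : Int))])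
          (by simp only [List.length_drop]; omega)
        rw [hrec]
        simp only [List.map_cons, List.map_map, List.append_assoc, List.cons_append, List.nil_append]
        refine congrArg (fun l => out ++ l) ?_
        refine congrArg₂ List.cons ?_ ?_
        · simp only [Prod.mk.injEq]
          constructor <;> ring
        · apply List.map_congr_left
          intro p _
          simp only [Function.comp_apply, Prod.mk.injEq]
          constructor <;> push_cast <;> ring

-- ===== VERDICT (by name: the statement is the Claim_ definition above) =====
theorem find_leftover_transcript_offsets_spec : Claim_equal_find_leftover_transcript_offsets := by
  intro seg txt _
  unfold Spec_find_leftover_transcript_offsets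
  unfold find_leftover_transcript_offsets find_leftover_transcript_offsets_alt
  rw [pvGoB_eq seg.length seg txt 0 [] le_rfl]
  simp
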